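-- pv_equiv track=rewrite | github.com/timothyobiso/spar-demo | experiments/run_free_ordering.py | classify_words
-- ===== SOURCE A (Python) =====
-- def classify_words(
--     text: str, kw_A: frozenset[str], kw_B: frozenset[str], window: int = 20,
-- ) -> list[str]:
--     """Label each whitespace-split word as 'A', 'B', or 'neutral' based on the
--     most recent keyword hit within `window` words."""
--     words = text.split()
--     labels: list[str] = []
--     last_a = -10**9
--     last_b = -10**9
--     for i, w in enumerate(words):
--         wl = w.lower()
--         if any(k in wl for k in kw_A):
--             last_a = i
--         if any(k in wl for k in kw_B):
--             last_b = i
--         age_a = i - last_a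
--         age_b = i - last_b
--         if age_a > window and age_b > window:
--             labels.append("neutral")
--         elif age_a <= age_b:
--             labels.append("A")
--         else:
--             labels.append("B")
--     return labels
-- ===== SOURCE B (Python) =====
-- def classify_words(text, kw_A, kw_B, window=20):
--     """Index-based re-implementation: collect the sorted hit positions for each
--     keyword set once, then locate the most recent hit for every word by binary
--     search over those position lists (no streaming last-hit state)."""
--     words = [w.lower() for w in text.split()]
--     SENT = -10 ** 9  # "no hit yet" position, as in the original convention
--
--     def hits(kws):
--         return [i for i, w in enumerate(words) if any(k in w for k in kws)]
--
--     def last_le(h, i):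
--         # rightmost element of the sorted list h that is <= i, else SENT
--         lo, hi = 0, len(h)
--         while lo < hi:
--             mid = (lo + hi) // 2
--             if h[mid] <= i:
--                 lo = mid + 1
--             else:
--                 hi = mid
--         return h[lo - 1] if lo else SENT
--
--     ha = hits(kw_A)
--     hb = hits(kw_B)
--     labels = []
--     for i in range(len(words)):
--         age_a = i - last_le(ha, i)
--         age_b = i - last_le(hb, i)
--         if age_a > window and age_b > window:
--             labels.append("neutral")
--         elif age_a <= age_b:
--             labels.append("A")
--         else:
--             labels.append("B")
--     return labels
-- ===== Notes on version B (the rewrite author's own statement) =====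
-- stated objective: alternative
-- what changed: B replaces A's streaming last-hit state (last_a/last_b carried through one enumerate loop) by precomputed sorted hit-position index lists per keyword set, queried with a hand-written binary search (bisect_right) for each word's most recent hit.
import Mathlib
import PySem

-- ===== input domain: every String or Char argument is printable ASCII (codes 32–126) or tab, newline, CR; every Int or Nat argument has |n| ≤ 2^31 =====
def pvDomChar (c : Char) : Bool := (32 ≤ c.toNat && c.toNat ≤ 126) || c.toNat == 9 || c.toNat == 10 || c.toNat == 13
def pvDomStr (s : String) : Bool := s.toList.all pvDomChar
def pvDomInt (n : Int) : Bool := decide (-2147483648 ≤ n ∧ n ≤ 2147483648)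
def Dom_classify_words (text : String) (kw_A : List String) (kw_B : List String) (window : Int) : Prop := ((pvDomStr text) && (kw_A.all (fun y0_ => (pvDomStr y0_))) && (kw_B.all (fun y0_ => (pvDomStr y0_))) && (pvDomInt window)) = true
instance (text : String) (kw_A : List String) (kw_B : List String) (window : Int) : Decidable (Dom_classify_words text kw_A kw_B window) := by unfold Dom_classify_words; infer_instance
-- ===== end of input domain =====

-- B replaces A's streaming last-hit state by precomputed sorted hit-position lists
-- per keyword set, queried by binary search per word (objective: alternative).

-- ===== PORT A =====
-- one loop over enumerate(words) carrying (last_a, last_b, labels)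
def classify_words (text : String) (kw_A : List String) (kw_B : List String) (window : Int) : List String :=
  let words := PySem.Str.split₀ text
  let st := (PySem.List.enumerate words 0).foldl
    (fun (st : Int × Int × List String) iw =>
      let i := iw.1
      let wl := PySem.Str.lower iw.2
      let last_a := if kw_A.any (fun k => PySem.Str.isIn k wl) then i else st.1
      let last_b := if kw_B.any (fun k => PySem.Str.isIn k wl) then i else st.2.1
      let age_a := i - last_a
      let age_b := i - last_b
      let lab := if age_a > window ∧ age_b > window then "neutral"
                 else if age_a ≤ age_b then "A" else "B"
      (last_a, last_b, st.2.2 ++ [lab]))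
    (-(10^9 : Int), -(10^9 : Int), [])
  st.2.2

-- ===== PORT B =====
-- Source B's hits(): positions whose (lowered) word contains some keyword
def cwHits (kws : List String) (words : List String) : List Int :=
  ((PySem.List.enumerate words 0).filter
      (fun iw => kws.any (fun k => PySem.Str.isIn k iw.2))).map (fun iw => iw.1)

-- Source B's while-loop of last_le: bisect_right on the sorted list h
def cwBsearch (h : List Int) (i : Int) (lo hi : Nat) : Nat :=
  if _hlt : lo < hi then
    let mid := (lo + hi) / 2
    if (PySem.List.pyGet? h (mid : Int)).getD 0 ≤ i then cwBsearch h i (mid + 1) hi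
    else cwBsearch h i lo mid
  else lo
termination_by hi - lo
decreasing_by all_goals omega

-- Source B's last_le: rightmost element of h that is ≤ i, else the sentinel
def cwLastLE (h : List Int) (i : Int) : Int :=
  let lo := cwBsearch h i 0 h.length
  if lo ≠ 0 then (PySem.List.pyGet? h ((lo - 1 : Nat) : Int)).getD 0 else -(10^9)

def classify_words_alt (text : String) (kw_A : List String) (kw_B : List String) (window : Int) : List String :=
  let words := (PySem.Str.split₀ text).map PySem.Str.lower
  let ha := cwHits kw_A words
  let hb := cwHits kw_B words
  (List.range words.length).map (fun (i : Nat) =>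
    let age_a : Int := (i : Int) - cwLastLE ha (i : Int)
    let age_b : Int := (i : Int) - cwLastLE hb (i : Int)
    if age_a > window ∧ age_b > window then "neutral"
    else if age_a ≤ age_b then "A" else "B")

-- ===== PRECONDITION & SPEC =====
def Spec_classify_words (text : String) (kw_A : List String) (kw_B : List String) (window : Int) (out : List String) : Prop := out = classify_words_alt text kw_A kw_B window
instance (text : String) (kw_A : List String) (kw_B : List String) (window : Int) (out : List String) : Decidable (Spec_classify_words text kw_A kw_B window out) := by unfold Spec_classify_words; infer_instance

-- ===== CLAIM (what is proved, stated in full; the proofs are below) =====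
def Claim_equal_classify_words : Prop := ∀ (text : String) (kw_A : List String) (kw_B : List String) (window : Int), Dom_classify_words text kw_A kw_B window → Spec_classify_words text kw_A kw_B window (classify_words text kw_A kw_B window)

-- ===== LEMMAS AND PROOFS =====

-- index of the most recent position j ≤ i with p j, else the sentinel
def lastIdx (p : Nat → Bool) : Nat → Int
  | 0 => if p 0 then 0 else -(10^9)
  | n + 1 => if p (n + 1) then ((n : Int) + 1) else lastIdx p n

-- the same with an Int argument (negative = "before the start")
def lastIdxZ (p : Nat → Bool) (i : Int) : Int :=
  if i < 0 then -(10^9) else lastIdx p i.toNat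

lemma lastIdxZ_step (p : Nat → Bool) (i : Nat) :
    lastIdxZ p (i : Int) = if p i then (i : Int) else lastIdxZ p ((i : Int) - 1) := by
  cases i with
  | zero => simp [lastIdxZ, lastIdx]
  | succ n =>
      have e1 : ((n + 1 : Nat) : Int) = (n : Int) + 1 := by push_cast; ring
      have hnn : ¬ ((n : Int) + 1 < 0) := by omega
      have e2 : ((n : Int) + 1 - 1) = (n : Int) := by ring
      have h2 : ¬ ((n : Int) < 0) := by omega
      have e3 : ((n : Int) + 1).toNat = n + 1 := by omega
      simp only [lastIdxZ, e1, hnn, if_false, e2, h2, e3, Int.toNat_natCast, lastIdx]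

lemma lastIdx_congr (p q : Nat → Bool) (i : Nat) (h : ∀ j ≤ i, p j = q j) :
    lastIdx p i = lastIdx q i := by
  induction i with
  | zero => simp [lastIdx, h 0 (le_refl 0)]
  | succ n ih =>
      simp only [lastIdx, h (n+1) (le_refl _)]
      rw [ih (fun j hj => h j (le_trans hj (Nat.le_succ n)))]

lemma lastIdx_of_none (p : Nat → Bool) (i : Nat) (h : ∀ j ≤ i, p j = false) :
    lastIdx p i = -(10^9) := by
  induction i with
  | zero => simp [lastIdx, h 0 (le_refl 0)]
  | succ n ih =>
      simp only [lastIdx, h (n+1) (le_refl _)]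
      simp only [Bool.false_eq_true, if_false]
      exact ih (fun j hj => h j (le_trans hj (Nat.le_succ n)))

lemma lastIdx_of_max (p : Nat → Bool) (i k : Nat) (hk : p k = true) (hki : k ≤ i)
    (hmax : ∀ j, k < j → j ≤ i → p j = false) :
    lastIdx p i = (k : Int) := by
  induction i with
  | zero =>
      have : k = 0 := Nat.le_zero.mp hki
      subst this; simp [lastIdx, hk]
  | succ n ih =>
      by_cases hp : p (n+1) = true
      · have : k = n + 1 := by
          by_contra hne
          have : k < n + 1 := lt_of_le_of_ne hki hne
          have := hmax (n+1) this (le_refl _)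
          simp [hp] at this
        subst this; simp [lastIdx, hp]
      · simp only [lastIdx, hp]
        simp only [Bool.false_eq_true, if_false]
        have hki' : k ≤ n := by
          rcases Nat.lt_succ_iff_lt_or_eq.mp (Nat.lt_succ_of_le hki) with h | h
          · omega
          · exact absurd (h ▸ hk) (by simpa using hp)
        exact ih hki' (fun j hj hjn => hmax j hj (le_trans hjn (Nat.le_succ n)))

-- ---- A side: the fold equals a per-index map built from lastIdx ----

lemma lastIdxZ_natCast (p : Nat → Bool) (i : Nat) : lastIdxZ p (i : Int) = lastIdx p i := by
  simp [lastIdxZ]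

lemma classify_fold_eq (kw_A kw_B : List String) (window : Int) (L : List String) :
    ∀ (ws pre : List String), pre ++ ws = L → ∀ (acc : List String),
    ((PySem.List.enumerate ws (pre.length : Int)).foldl
      (fun (st : Int × Int × List String) iw =>
        let i := iw.1
        let wl := PySem.Str.lower iw.2
        let last_a := if kw_A.any (fun k => PySem.Str.isIn k wl) then i else st.1
        let last_b := if kw_B.any (fun k => PySem.Str.isIn k wl) then i else st.2.1
        let age_a := i - last_a
        let age_b := i - last_b
        let lab := if age_a > window ∧ age_b > window then "neutral"
                   else if age_a ≤ age_b then "A" else "B"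
        (last_a, last_b, st.2.2 ++ [lab]))
      (lastIdxZ (fun j => kw_A.any (fun k => PySem.Str.isIn k (PySem.Str.lower (L.getD j "")))) ((pre.length : Int) - 1),
       lastIdxZ (fun j => kw_B.any (fun k => PySem.Str.isIn k (PySem.Str.lower (L.getD j "")))) ((pre.length : Int) - 1),
       acc)).2.2
    = acc ++ (List.range ws.length).map (fun t =>
        let i : Int := ((pre.length + t : Nat) : Int)
        let age_a := i - lastIdx (fun j => kw_A.any (fun k => PySem.Str.isIn k (PySem.Str.lower (L.getD j "")))) (pre.length + t)
        let age_b := i - lastIdx (fun j => kw_B.any (fun k => PySem.Str.isIn k (PySem.Str.lower (L.getD j "")))) (pre.length + t)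
        if age_a > window ∧ age_b > window then "neutral"
        else if age_a ≤ age_b then "A" else "B") := by
  intro ws
  induction ws with
  | nil => intro pre hL acc; simp [PySem.List.enumerate]
  | cons w ws ih =>
      intro pre hL acc
      have hw : L.getD pre.length "" = w := by
        rw [← hL]
        simp [List.getD_eq_getElem?_getD]
      rw [PySem.List.enumerate_cons, List.foldl_cons]
      have ih' := ih (pre ++ [w]) (by rw [← hL]; simp)
      rw [show (((pre ++ [w]).length : Nat) : Int) = (pre.length : Int) + 1 by simp] at ih'
      rw [show (pre.length : Int) + 1 - 1 = (pre.length : Int) by ring] at ih'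
      have hstepA := lastIdxZ_step (fun j => kw_A.any (fun k => PySem.Str.isIn k (PySem.Str.lower (L.getD j "")))) pre.length
      rw [hw] at hstepA
      have hstepB := lastIdxZ_step (fun j => kw_B.any (fun k => PySem.Str.isIn k (PySem.Str.lower (L.getD j "")))) pre.length
      rw [hw] at hstepB
      rw [hstepA, hstepB] at ih'
      refine (ih' _).trans ?_
      have hA0 : lastIdx (fun j => kw_A.any (fun k => PySem.Str.isIn k (PySem.Str.lower (L.getD j "")))) pre.length
          = if kw_A.any (fun k => PySem.Str.isIn k (PySem.Str.lower w)) then (pre.length : Int)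
            else lastIdxZ (fun j => kw_A.any (fun k => PySem.Str.isIn k (PySem.Str.lower (L.getD j "")))) ((pre.length : Int) - 1) :=
        (lastIdxZ_natCast _ _).symm.trans hstepA
      have hB0 : lastIdx (fun j => kw_B.any (fun k => PySem.Str.isIn k (PySem.Str.lower (L.getD j "")))) pre.length
          = if kw_B.any (fun k => PySem.Str.isIn k (PySem.Str.lower w)) then (pre.length : Int)
            else lastIdxZ (fun j => kw_B.any (fun k => PySem.Str.isIn k (PySem.Str.lower (L.getD j "")))) ((pre.length : Int) - 1) :=
        (lastIdxZ_natCast _ _).symm.trans hstepB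
      rw [List.length_cons, List.range_succ_eq_map, List.map_cons, List.map_map, List.append_assoc, List.singleton_append]
      congr 1
      congr 1
      · simp only [Nat.add_zero, hA0, hB0]
      · apply List.map_congr_left
        intro t _
        have hlen : (pre ++ [w]).length + t = pre.length + (t + 1) := by simp; omega
        simp only [Function.comp, hlen]

-- ---- B side: cwHits characterization ----

lemma cwHits_gen (q : String → Bool) :
    ∀ (lws : List String) (s : Nat),
    ((PySem.List.enumerate lws (s : Int)).filter (fun iw => q iw.2)).map (fun iw => iw.1)
    = ((List.range lws.length).filter (fun j => q (lws.getD j ""))).map (fun j => ((s + j : Nat) : Int)) := by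
  intro lws
  induction lws with
  | nil => intro s; simp [PySem.List.enumerate]
  | cons w ws ih =>
      intro s
      rw [PySem.List.enumerate_cons]
      have e1 : (s : Int) + 1 = ((s + 1 : Nat) : Int) := by push_cast; ring
      rw [e1]
      simp only [List.length_cons, List.range_succ_eq_map, List.filter_cons, List.getD_cons_zero]
      have tail : List.map (fun j => ((s + j : Nat) : Int))
            (List.filter (fun j => q ((w :: ws).getD j "")) (List.map Nat.succ (List.range ws.length)))
          = List.map (fun iw => iw.1) (List.filter (fun iw => q iw.2) (PySem.List.enumerate ws ((s+1 : Nat) : Int))) := by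
        rw [List.filter_map, List.map_map, ih (s+1)]
        apply List.map_congr_left
        intro j _
        simp only [Function.comp]
        congr 1
        omega
      by_cases hq : q w
      · simp only [hq, if_pos, List.map_cons, tail]
        congr 1
      · simp only [hq, Bool.false_eq_true, if_false, tail]

lemma cwHits_eq (kws : List String) (lws : List String) :
    cwHits kws lws
    = ((List.range lws.length).filter (fun j => kws.any (fun k => PySem.Str.isIn k (lws.getD j "")))).map
        (fun (j : Nat) => (j : Int)) := by
  have := cwHits_gen (fun w => kws.any (fun k => PySem.Str.isIn k w)) lws 0
  simp only [Nat.zero_add, Nat.cast_zero] at this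
  unfold cwHits
  exact this

-- ---- binary search invariant ----

lemma cwBsearch_inv (h : List Int) (hs : h.Pairwise (· < ·)) (i : Int) :
    ∀ (n lo hi : Nat), hi - lo ≤ n → lo ≤ hi → hi ≤ h.length →
    (∀ j (hj : j < h.length), j < lo → h[j] ≤ i) →
    (∀ j (hj : j < h.length), hi ≤ j → i < h[j]) →
    lo ≤ cwBsearch h i lo hi ∧ cwBsearch h i lo hi ≤ hi ∧
    (∀ j (hj : j < h.length), j < cwBsearch h i lo hi → h[j] ≤ i) ∧
    (∀ j (hj : j < h.length), cwBsearch h i lo hi ≤ j → i < h[j]) := by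
  have mono : ∀ a b (ha : a < h.length) (hb : b < h.length), a < b → h[a] < h[b] :=
    fun a b ha hb hab => List.pairwise_iff_getElem.mp hs a b ha hb hab
  intro n
  induction n with
  | zero =>
      intro lo hi hn hle hlen hpre hpost
      have : ¬ lo < hi := by omega
      rw [cwBsearch, dif_neg this]
      exact ⟨le_refl _, hle, hpre, fun j hj hjlo => hpost j hj (by omega)⟩
  | succ n ih =>
      intro lo hi hn hle hlen hpre hpost
      by_cases hlt : lo < hi
      · rw [cwBsearch, dif_pos hlt]
        simp only
        have hmid : (lo + hi) / 2 < h.length := by omega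
        have hmidlo : lo ≤ (lo + hi) / 2 := by omega
        have hmidhi : (lo + hi) / 2 < hi := by omega
        have hget : (PySem.List.pyGet? h (((lo + hi) / 2 : Nat) : Int)).getD 0 = h[(lo + hi) / 2] := by
          rw [PySem.List.pyGet?_natCast]
          simp [List.getElem?_eq_getElem hmid]
        rw [hget]
        by_cases hc : h[(lo + hi) / 2] ≤ i
        · rw [if_pos hc]
          have := ih ((lo + hi) / 2 + 1) hi (by omega) (by omega) hlen
            (fun j hj hjlo => by
              rcases Nat.lt_succ_iff_lt_or_eq.mp hjlo with hj' | hj'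
              · exact le_trans (le_of_lt (mono j _ hj hmid hj')) hc
              · subst hj'; exact hc)
            hpost
          exact ⟨le_trans (by omega) this.1, this.2.1, this.2.2.1, this.2.2.2⟩
        · rw [if_neg hc]
          replace hc := lt_of_not_ge hc
          have := ih lo ((lo + hi) / 2) (by omega) (by omega) (by omega) hpre
            (fun j hj hjlo => by
              rcases Nat.eq_or_lt_of_le hjlo with hj' | hj'
              · exact hj' ▸ hc
              · exact lt_trans hc (mono _ j hmid hj hj'))
          exact ⟨this.1, by omega, this.2.2.1, this.2.2.2⟩
      · rw [cwBsearch, dif_neg hlt]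
        exact ⟨le_refl _, hle, hpre, fun j hj hjlo => hpost j hj (by omega)⟩

lemma cwLastLE_eq (kws : List String) (lws : List String) (i : Nat) (hilen : i < lws.length) :
    cwLastLE (cwHits kws lws) (i : Int)
    = lastIdx (fun j => kws.any (fun k => PySem.Str.isIn k (lws.getD j ""))) i := by
  set q : Nat → Bool := fun j => kws.any (fun k => PySem.Str.isIn k (lws.getD j "")) with hq
  set h : List Int := cwHits kws lws with hh
  have hrepr : h = ((List.range lws.length).filter q).map (fun (j : Nat) => (j : Int)) := cwHits_eq kws lws
  have hpair : h.Pairwise (· < ·) := by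
    rw [hrepr]
    refine List.pairwise_map.mpr ?_
    refine List.Pairwise.filter _ ?_
    have := List.pairwise_lt_range (n := lws.length)
    exact this.imp (fun hab => by exact_mod_cast hab)
  have hmem : ∀ (x : Int), x ∈ h ↔ ∃ j : Nat, j < lws.length ∧ q j = true ∧ x = (j : Int) := by
    intro x
    rw [hrepr]
    simp only [List.mem_map, List.mem_filter, List.mem_range]
    constructor
    · rintro ⟨j, ⟨hj1, hj2⟩, rfl⟩; exact ⟨j, hj1, hj2, rfl⟩
    · rintro ⟨j, hj1, hj2, rfl⟩; exact ⟨j, ⟨hj1, hj2⟩, rfl⟩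
  have mono : ∀ a b (ha : a < h.length) (hb : b < h.length), a ≤ b → h[a] ≤ h[b] := by
    intro a b ha hb hab
    rcases Nat.eq_or_lt_of_le hab with rfl | hab'
    · exact le_refl _
    · exact le_of_lt (List.pairwise_iff_getElem.mp hpair a b ha hb hab')
  obtain ⟨-, hrhi, hbelow, habove⟩ := cwBsearch_inv h hpair (i : Int) h.length 0 h.length
    (by omega) (Nat.zero_le _) (le_refl _)
    (fun j hj hjlt => absurd hjlt (Nat.not_lt_zero j))
    (fun j hj hjge => absurd hj (by omega))
  set r : Nat := cwBsearch h (i : Int) 0 h.length with hr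
  by_cases hr0 : r = 0
  · have hnone : ∀ j ≤ i, q j = false := by
      intro j hji
      by_contra hqj
      have hxin : (j : Int) ∈ h := (hmem _).mpr ⟨j, by omega, by simpa using hqj, rfl⟩
      obtain ⟨m, hm, hmj⟩ := List.getElem_of_mem hxin
      have := habove m hm (by omega)
      rw [hmj] at this
      exact absurd this (by omega)
    rw [lastIdx_of_none _ _ hnone]
    simp only [cwLastLE, ← hr, hr0]
    simp
  · have hr1 : r - 1 < h.length := by
      have : r ≤ h.length := by
        -- r ≤ hi = h.length from the invariant
        have := cwBsearch_inv h hpair (i : Int) h.length 0 h.length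
          (by omega) (Nat.zero_le _) (le_refl _)
          (fun j hj hjlt => absurd hjlt (Nat.not_lt_zero j))
          (fun j hj hjge => absurd hj (by omega))
        exact this.2.1
      omega
    have hv : cwLastLE h (i : Int) = h[r - 1] := by
      simp only [cwLastLE, ← hr, hr0, ne_eq, not_false_iff, if_pos]
      rw [PySem.List.pyGet?_natCast]
      simp [List.getElem?_eq_getElem hr1]
    obtain ⟨k, hkn, hqk, hke⟩ := (hmem h[r - 1]).mp (List.getElem_mem hr1)
    have hki : k ≤ i := by
      have := hbelow (r - 1) hr1 (by omega)
      rw [hke] at this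
      exact_mod_cast this
    have hmax : ∀ j, k < j → j ≤ i → q j = false := by
      intro j hkj hji
      by_contra hqj
      have hxin : (j : Int) ∈ h := (hmem _).mpr ⟨j, by omega, by simpa using hqj, rfl⟩
      obtain ⟨m, hm, hmj⟩ := List.getElem_of_mem hxin
      by_cases hmr : m < r
      · have : h[m] ≤ h[r - 1] := mono m (r - 1) hm hr1 (by omega)
        rw [hmj, hke] at this
        have : j ≤ k := by exact_mod_cast this
        omega
      · have := habove m hm (by omega)
        rw [hmj] at this
        have : i < j := by exact_mod_cast this
        omega
    rw [lastIdx_of_max q i k hqk hki hmax, hv, hke]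

-- ===== VERDICT (by name: the statement is the Claim_ definition above) =====
theorem classify_words_spec : Claim_equal_classify_words := by
  intro text kw_A kw_B window _
  unfold Spec_classify_words classify_words classify_words_alt
  simp only
  have hfold := classify_fold_eq kw_A kw_B window (PySem.Str.split₀ text) (PySem.Str.split₀ text) [] rfl []
  simp only [List.length_nil, Nat.cast_zero, zero_sub, List.nil_append, Nat.zero_add] at hfold
  have hinit : ∀ (p : Nat → Bool), lastIdxZ p (-1) = -(10^9) := by
    intro p; simp [lastIdxZ]
  rw [hinit, hinit] at hfold
  rw [hfold, List.length_map]
  apply List.map_congr_left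
  intro t ht
  have htlen : t < (PySem.Str.split₀ text).length := List.mem_range.mp ht
  have htlen' : t < ((PySem.Str.split₀ text).map PySem.Str.lower).length := by
    rw [List.length_map]; exact htlen
  rw [cwLastLE_eq kw_A _ t htlen', cwLastLE_eq kw_B _ t htlen']
  rw [lastIdx_congr (fun j => kw_A.any (fun k => PySem.Str.isIn k (((PySem.Str.split₀ text).map PySem.Str.lower).getD j "")))
        (fun j => kw_A.any (fun k => PySem.Str.isIn k (PySem.Str.lower ((PySem.Str.split₀ text).getD j "")))) t
        (fun j hj => by
          have hjlt : j < (PySem.Str.split₀ text).length := by omega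
          simp [List.getD_eq_getElem?_getD, List.getElem?_map, List.getElem?_eq_getElem hjlt]),
      lastIdx_congr (fun j => kw_B.any (fun k => PySem.Str.isIn k (((PySem.Str.split₀ text).map PySem.Str.lower).getD j "")))
        (fun j => kw_B.any (fun k => PySem.Str.isIn k (PySem.Str.lower ((PySem.Str.split₀ text).getD j "")))) t
        (fun j hj => by
          have hjlt : j < (PySem.Str.split₀ text).length := by omega
          simp [List.getD_eq_getElem?_getD, List.getElem?_map, List.getElem?_eq_getElem hjlt])]
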